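-- pv_equiv track=rewrite | github.com/duckbill413/coding_test | python/2022_kakao_mobility/2.py | solution
-- ===== SOURCE A (Python) =====
-- def solution(id_list, k):
--     coupons = {}
--     answer = 0
--
--     for id in id_list:
--         day = id.split()
--         day_list = []
--         for i in day:
--             if i not in day_list:
--                 if i in coupons:
--                     if coupons[i] < k:
--                         coupons[i] += 1
--                         answer += 1
--                 else:
--                     coupons[i] = 1
--                     answer += 1
--                 day_list.append(i)
--     return answer
-- ===== SOURCE B (Python) =====
-- def solution(id_list, k):
--     counts = {}
--     for s in id_list:
--         for w in set(s.split()):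
--             counts[w] = counts.get(w, 0) + 1
--     cap = k if k > 1 else 1
--     return sum(min(c, cap) for c in counts.values())
-- ===== Notes on version B (the rewrite author's own statement) =====
-- stated objective: simpler
-- what changed: Replaces A's interleaved count-and-cap accumulation (dict of capped counters plus a running answer updated inside nested loops with a manual day_list dedup) by a two-pass decomposition: build a full per-word frequency table with per-string set() dedup, then sum min(count, max(k,1)) over the table.
import Mathlib
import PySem

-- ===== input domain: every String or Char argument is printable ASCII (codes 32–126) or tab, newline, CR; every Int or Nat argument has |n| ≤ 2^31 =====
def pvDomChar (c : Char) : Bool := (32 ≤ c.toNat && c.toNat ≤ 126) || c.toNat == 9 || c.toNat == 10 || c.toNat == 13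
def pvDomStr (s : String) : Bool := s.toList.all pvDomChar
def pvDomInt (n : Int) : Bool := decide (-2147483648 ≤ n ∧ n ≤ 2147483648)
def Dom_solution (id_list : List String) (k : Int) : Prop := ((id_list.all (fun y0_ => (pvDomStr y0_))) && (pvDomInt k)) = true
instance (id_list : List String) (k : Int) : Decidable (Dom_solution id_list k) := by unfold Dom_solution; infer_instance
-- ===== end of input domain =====

-- B replaces A's interleaved count-and-cap accumulation by a two-pass decomposition
-- (full frequency table, then sum the capped counts); objective: simpler.

-- ===== PORT A =====
def solution (id_list : List String) (k : Int) : Int :=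
  let st := id_list.foldl (fun (st : PySem.Dict String Int × Int) id =>
    let day := PySem.Str.split₀ id
    let r := day.foldl (fun (st2 : (PySem.Dict String Int × Int) × List String) i =>
      if st2.2.contains i then st2
      else
        let coupons := st2.1.1
        let answer := st2.1.2
        let st' :=
          if coupons.contains i then
            if coupons.getD i 0 < k then (coupons.insert i (coupons.getD i 0 + 1), answer + 1)
            else (coupons, answer)
          else (coupons.insert i 1, answer + 1)
        (st', st2.2 ++ [i])) (st, ([] : List String))
    r.1) (PySem.Dict.empty, (0 : Int))
  st.2

-- ===== PORT B =====
def solution_alt (id_list : List String) (k : Int) : Int :=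
  let counts : PySem.Dict String Int := id_list.foldl (fun d s =>
    (PySem.Set.ofList (PySem.Str.split₀ s)).foldl (fun d w => d.insert w (d.getD w 0 + 1)) d)
    PySem.Dict.empty
  let cap : Int := if k > 1 then k else 1
  (counts.values.map (fun c => min c cap)).sum

-- ===== PRECONDITION & SPEC =====
def Spec_solution (id_list : List String) (k : Int) (out : Int) : Prop := out = solution_alt id_list k
instance (id_list : List String) (k : Int) (out : Int) : Decidable (Spec_solution id_list k out) := by unfold Spec_solution; infer_instance

-- ===== CLAIM (what is proved, stated in full; the proofs are below) =====
def Claim_equal_solution : Prop := ∀ (id_list : List String) (k : Int), Dom_solution id_list k → Spec_solution id_list k (solution id_list k)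

-- ===== LEMMAS AND PROOFS =====

-- cap = max(k, 1): A's first grant to a word ignores k, later grants need coupons[w] < k.
def capOf (k : Int) : Int := if k > 1 then k else 1

lemma capOf_ge_one (k : Int) : 1 ≤ capOf k := by
  unfold capOf; split_ifs with h <;> omega

lemma capOf_ge_k (k : Int) : k ≤ capOf k := by
  unfold capOf; split_ifs with h <;> omega

-- A's per-word step, once the day_list dedup has been factored out.
def stepA (k : Int) (st : PySem.Dict String Int × Int) (w : String) : PySem.Dict String Int × Int :=
  if st.1.contains w then
    if st.1.getD w 0 < k then (st.1.insert w (st.1.getD w 0 + 1), st.2 + 1)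
    else st
  else (st.1.insert w 1, st.2 + 1)

-- The words of `day` actually processed by A's inner loop: first occurrences not in `seen`.
def newOf : List String → List String → List String
  | _, [] => []
  | seen, w :: rest => if seen.contains w then newOf seen rest else w :: newOf (w :: seen) rest

-- A's inner loop over `day` with a manual day_list equals the stepA-fold over newOf.
lemma inner_eq (k : Int) : ∀ (day : List String) (st : PySem.Dict String Int × Int)
    (seen acc : List String), (∀ x, seen.contains x = acc.contains x) →
    (day.foldl (fun (st2 : (PySem.Dict String Int × Int) × List String) i =>
      if st2.2.contains i then st2
      else
        let coupons := st2.1.1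
        let answer := st2.1.2
        let st' :=
          if coupons.contains i then
            if coupons.getD i 0 < k then (coupons.insert i (coupons.getD i 0 + 1), answer + 1)
            else (coupons, answer)
          else (coupons.insert i 1, answer + 1)
        (st', st2.2 ++ [i])) (st, seen)).1
      = (newOf acc day).foldl (stepA k) st := by
  intro day
  induction day with
  | nil => intro st seen acc h; simp [newOf]
  | cons w rest ih =>
    intro st seen acc h
    simp only [List.foldl_cons, newOf, ← h]
    by_cases hw : seen.contains w
    · simp only [hw, if_true]
      exact ih _ _ _ h
    · simp only [hw, Bool.false_eq_true, if_false, List.foldl_cons]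
      rw [ih _ (seen ++ [w]) (w :: acc)
        (by intro x; have hx := h x; simp at hx; simp [hx, Bool.or_comm])]
      rfl

-- newOf from empty seen is exactly Python's set() dedup (first occurrences).
lemma newOf_eq_ofList : ∀ (day seen acc : List String),
    (∀ x, acc.contains x = seen.contains x) →
    day.foldl PySem.Set.add acc = acc ++ newOf seen day := by
  intro day
  induction day with
  | nil => intro seen acc h; simp [newOf]
  | cons w rest ih =>
    intro seen acc h
    simp only [List.foldl_cons, newOf, PySem.Set.add, PySem.Set.contains, h]
    by_cases hw : seen.contains w
    · simp only [hw, if_true]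
      exact ih seen acc h
    · simp only [hw, Bool.false_eq_true, if_false]
      rw [ih (w :: seen) (acc ++ [w])
        (by intro x; have hx := h x; simp at hx; simp [hx, Bool.or_comm])]
      simp

lemma ofList_eq_newOf (day : List String) :
    PySem.Set.ofList day = newOf [] day := by
  have := newOf_eq_ofList day [] [] (by intro x; rfl)
  simpa [PySem.Set.ofList_eq_foldl] using this

-- sum over a nodup list where the mapped function changes at exactly one element
lemma sum_map_update (l : List String) (w : String) (f g : String → Int)
    (hl : l.Nodup) (hw : w ∈ l) (hfg : ∀ v ∈ l, v ≠ w → f v = g v) :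
    (l.map g).sum = (l.map f).sum + (g w - f w) := by
  induction l with
  | nil => cases hw
  | cons a rest ih =>
    rcases List.mem_cons.mp hw with rfl | hwr
    · have : ∀ v ∈ rest, f v = g v := by
        intro v hv
        exact hfg v (List.mem_cons_of_mem _ hv) (by rintro rfl; exact (List.nodup_cons.mp hl).1 hv)
      simp only [List.map_cons, List.sum_cons]
      rw [List.map_congr_left (fun v hv => (this v hv).symm)]
      ring
    · have ha : a ≠ w := by rintro rfl; exact (List.nodup_cons.mp hl).1 hwr
      simp only [List.map_cons, List.sum_cons]
      rw [ih (List.nodup_cons.mp hl).2 hwr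
        (fun v hv hvw => hfg v (List.mem_cons_of_mem _ hv) hvw),
        hfg a (List.mem_cons_self) ha]
      ring

-- The characterization of A's stepA-fold from the empty state.
lemma foldA_char (k : Int) : ∀ ws : List String,
    (ws.foldl (stepA k) (PySem.Dict.empty, 0)).1.items
      = (PySem.Set.ofList ws).map (fun w => (w, min ((ws.count w : Nat) : Int) (capOf k)))
    ∧ (ws.foldl (stepA k) (PySem.Dict.empty, 0)).2
      = ((PySem.Set.ofList ws).map (fun w => min ((ws.count w : Nat) : Int) (capOf k))).sum := by
  intro ws
  induction ws using List.reverseRecOn with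
  | nil => exact ⟨rfl, rfl⟩
  | append_singleton ws w ih =>
    obtain ⟨ih1, ih2⟩ := ih
    set d := (ws.foldl (stepA k) (PySem.Dict.empty, 0)).1 with hd
    set a := (ws.foldl (stepA k) (PySem.Dict.empty, 0)).2 with ha
    have hkeys : d.keys = PySem.Set.ofList ws := by
      show d.items.map Prod.fst = _
      rw [ih1, List.map_map]
      simp [Function.comp_def]
    have hnodup : d.keys.Nodup := by rw [hkeys]; exact PySem.Set.nodup_ofList ws
    have hcontains : d.contains w = decide (w ∈ ws) := by
      rw [PySem.Dict.contains_eq_decide_mem_keys, hkeys]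
      simp [PySem.Set.mem_ofList]
    have hfold : (ws ++ [w]).foldl (stepA k) (PySem.Dict.empty, 0) = stepA k (d, a) w := by
      rw [List.foldl_append]; rfl
    by_cases hmem : w ∈ ws
    · -- w already counted: set unchanged, count at w goes up by one
      have hofl : PySem.Set.ofList (ws ++ [w]) = PySem.Set.ofList ws := by
        rw [PySem.Set.ofList_eq_foldl, List.foldl_append, ← PySem.Set.ofList_eq_foldl]
        simp [PySem.Set.add, PySem.Set.contains, PySem.Set.mem_ofList, hmem]
      have hcount1 : 1 ≤ ws.count w := List.count_pos_iff.mpr hmem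
      have hget : d.getD w 0 = min ((ws.count w : Nat) : Int) (capOf k) :=
        PySem.Dict.getD_of_mem_items d
          (by rw [ih1]; exact List.mem_map_of_mem ((PySem.Set.mem_ofList _ _).mpr hmem))
          hnodup 0
      have hcnt_eq : ∀ v, v ≠ w → ((ws ++ [w]).count v : Int) = (ws.count v : Int) := by
        intro v hv; simp [List.count_append, Ne.symm hv]
      have hcnt_w : (((ws ++ [w]).count w : Nat) : Int) = ((ws.count w : Nat) : Int) + 1 := by
        simp [List.count_append]
      rw [hfold]
      unfold stepA
      simp only [hcontains, hmem, decide_true, if_true]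
      by_cases hlt : d.getD w 0 < k
      · -- increment: min c cap < k ≤ cap forces c < cap
        have hlt' := hlt
        rw [hget] at hlt'
        have hcapk := capOf_ge_k k
        have hc : min ((ws.count w : Nat) : Int) (capOf k) = ((ws.count w : Nat) : Int) := by
          omega
        have hc1 : min (((ws.count w : Nat) : Int) + 1) (capOf k) = ((ws.count w : Nat) : Int) + 1 := by
          omega
        simp only [hlt, if_true]
        constructor
        · rw [PySem.Dict.items_insert_of_contains d _ (by rw [hcontains]; simp [hmem]), ih1, hofl,
            List.map_map]
          apply List.map_congr_left
          intro v hv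
          dsimp only [Function.comp_def]
          by_cases hvw : v = w
          · subst hvw
            simp [hget, hc, hc1]

          · rw [if_neg (by simp [hvw]), hcnt_eq v hvw]
        · rw [ih2, hofl]
          rw [sum_map_update (PySem.Set.ofList ws) w
            (fun v => min ((ws.count v : Nat) : Int) (capOf k))
            (fun v => min (((ws ++ [w]).count v : Nat) : Int) (capOf k))
            (PySem.Set.nodup_ofList ws) (by simpa [PySem.Set.mem_ofList] using hmem)
            (fun v _ hvw => by simp only [hcnt_eq v hvw])]
          rw [hcnt_w, hc1, hc]
          ring
      · -- saturated: min c cap = min (c+1) cap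
        have hstable : min (((ws.count w : Nat) : Int) + 1) (capOf k)
            = min ((ws.count w : Nat) : Int) (capOf k) := by
          have hc1' : (1 : Int) ≤ ((ws.count w : Nat) : Int) := by exact_mod_cast hcount1
          have hlt' := hlt
          rw [hget] at hlt'
          unfold capOf at hlt' ⊢
          split_ifs at hlt' ⊢ with hk <;> omega
        simp only [hlt, if_false]
        constructor
        · rw [ih1, hofl]
          apply List.map_congr_left
          intro v hv
          by_cases hvw : v = w
          · subst hvw; simp only [hcnt_w, hstable]
          · simp only [hcnt_eq v hvw]
        · rw [ih2, hofl]
          apply congrArg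
          apply List.map_congr_left
          intro v hv
          by_cases hvw : v = w
          · subst hvw; simp only [hcnt_w, hstable]
          · simp only [hcnt_eq v hvw]
    · -- fresh word: appended with count 1 = min 1 cap
      have hofl : PySem.Set.ofList (ws ++ [w]) = PySem.Set.ofList ws ++ [w] := by
        rw [PySem.Set.ofList_eq_foldl, List.foldl_append, ← PySem.Set.ofList_eq_foldl]
        simp [PySem.Set.add, PySem.Set.contains, hmem]
      have hcnt_eq : ∀ v, v ≠ w → ((ws ++ [w]).count v : Int) = (ws.count v : Int) := by
        intro v hv; simp [List.count_append, Ne.symm hv]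
      have hcnt_w : (((ws ++ [w]).count w : Nat) : Int) = 1 := by
        simp [List.count_append, List.count_eq_zero_of_not_mem hmem]
      have hmin1 : min (1 : Int) (capOf k) = 1 := by
        have := capOf_ge_one k; omega
      rw [hfold]
      unfold stepA
      simp only [hcontains, hmem, decide_false, Bool.false_eq_true, if_false]
      constructor
      · rw [PySem.Dict.items_insert_of_not_contains d _ (by rw [hcontains]; simp [hmem]), ih1, hofl]
        rw [List.map_append]
        apply congrArg₂
        · apply List.map_congr_left
          intro v hv
          simp only [hcnt_eq v (by rintro rfl; exact hmem ((PySem.Set.mem_ofList _ _).mp hv))]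
        · simp [List.count_eq_zero_of_not_mem hmem, hmin1]
      · rw [ih2, hofl, List.map_append, List.sum_append]
        simp only [List.map_cons, List.map_nil, List.sum_cons, List.sum_nil]
        rw [hcnt_w, hmin1]
        apply congrArg₂ _ _ rfl
        apply congrArg
        apply List.map_congr_left
        intro v hv
        simp only [hcnt_eq v (by rintro rfl; exact hmem ((PySem.Set.mem_ofList _ _).mp hv))]

-- ===== VERDICT (by name: the statement is the Claim_ definition above) =====
theorem solution_spec : Claim_equal_solution := by
  intro id_list k _
  show solution id_list k = solution_alt id_list k
  unfold solution solution_alt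
  simp only []
  -- normalize A: inner dedup loop = stepA-fold over Set.ofList, then flatten both folds
  have hA : id_list.foldl (fun (st : PySem.Dict String Int × Int) id =>
      (let day := PySem.Str.split₀ id
       let r := day.foldl (fun (st2 : (PySem.Dict String Int × Int) × List String) i =>
        if st2.2.contains i then st2
        else
          let coupons := st2.1.1
          let answer := st2.1.2
          let st' :=
            if coupons.contains i then
              if coupons.getD i 0 < k then (coupons.insert i (coupons.getD i 0 + 1), answer + 1)
              else (coupons, answer)
            else (coupons.insert i 1, answer + 1)
          (st', st2.2 ++ [i])) (st, ([] : List String))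
       r.1)) (PySem.Dict.empty, (0 : Int))
      = (id_list.flatMap (fun s => PySem.Set.ofList (PySem.Str.split₀ s))).foldl (stepA k)
          (PySem.Dict.empty, (0 : Int)) := by
    rw [List.foldl_flatMap]
    congr 1
    funext st s
    rw [inner_eq k (PySem.Str.split₀ s) st [] [] (fun _ => rfl), ofList_eq_newOf]
  rw [hA]
  set ws := id_list.flatMap (fun s => PySem.Set.ofList (PySem.Str.split₀ s)) with hws
  -- normalize B: the nested insert-fold is Counter(ws)
  have hB : id_list.foldl (fun (d : PySem.Dict String Int) s =>
      (PySem.Set.ofList (PySem.Str.split₀ s)).foldl (fun d w => d.insert w (d.getD w 0 + 1)) d)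
      PySem.Dict.empty = PySem.Dict.counter ws := by
    rw [← PySem.Dict.foldl_insert_getD_add_one_eq_counter, hws, List.foldl_flatMap]
  rw [hB]
  have hchar := (foldA_char k ws).2
  rw [hchar]
  have hvals : (PySem.Dict.counter ws).values
      = (PySem.Set.ofList ws).map (fun w => ((ws.count w : Nat) : Int)) := by
    show (PySem.Dict.counter ws).items.map Prod.snd = _
    rw [PySem.Dict.items_counter, List.map_map]
    rfl
  rw [hvals, List.map_map]
  apply congrArg
  apply List.map_congr_left
  intro v _
  show min ((ws.count v : Nat) : Int) (capOf k) = min ((ws.count v : Nat) : Int) (if k > 1 then k else 1)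
  rfl
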